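-- pv_equiv track=rewrite | github.com/DSW41923/AoC_DSW41923 | 2021/Day_13.py | fold_dots
-- ===== SOURCE A (Python) =====
-- import itertools
--
-- def fold_dots(positions, instructions):
--     for axis, axis_num in instructions:
--         if axis == 'x':
--             new_positions = [[0 for _ in range(axis_num)] for _ in range(len(positions))]
--             for y, x in itertools.product(range(len(positions)), range(len(positions[0]))):
--                 if x < axis_num:
--                     new_positions[y][x] = positions[y][x]
--                     continue
--
--                 if x > axis_num:
--                     new_positions[y][2 * axis_num - x] |= positions[y][x]
--                     continue
--
--             positions = new_positions
--             continue
--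
--         if axis == 'y':
--             new_positions = [[0 for _ in range(len(positions[0]))] for _ in range(axis_num)]
--             for y, x in itertools.product(range(len(positions)), range(len(positions[0]))):
--                 if y < axis_num:
--                     new_positions[y][x] = positions[y][x]
--                     continue
--
--                 if y > axis_num:
--                     new_positions[2 * axis_num - y][x] |= positions[y][x]
--                     continue
--
--             positions = new_positions
--             continue
--
--         raise
--
--     return positions
-- ===== SOURCE B (Python) =====
-- def _fold_line(seq, axis_num, zero, combine):
--     # Build the kept half directly: out[i] = seq[i] (or zero past the end),
--     # combined with its mirror seq[2*axis_num - i] when that lies on the sheet.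
--     out = []
--     for i in range(axis_num):
--         v = seq[i] if i < len(seq) else zero
--         j = 2 * axis_num - i
--         if j < len(seq):
--             v = combine(v, seq[j])
--         out.append(v)
--     return out
--
--
-- def fold_dots(positions, instructions):
--     for axis, axis_num in instructions:
--         if axis == 'y':
--             positions = _fold_line(positions, axis_num,
--                                    [0] * len(positions[0]),
--                                    lambda u, v: [p | q for p, q in zip(u, v)])
--         elif axis == 'x':
--             positions = [_fold_line(row, axis_num, 0, lambda u, v: u | v)
--                          for row in positions]
--         else:
--             raise ValueError(axis)
--     return positions
-- ===== Notes on version B (the rewrite author's own statement) =====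
-- stated objective: simpler
-- what changed: B replaces A's preallocated new grid plus nested index loop with conditional in-place writes by a single generic line-folding helper that builds the kept half front to back (out[i] = seq[i] OR its mirror seq[2a-i] when it lies on the sheet), applied to the row list for a 'y' fold and mapped over each row for an 'x' fold.
-- outside the precondition, e.g. on fold_dots([[1], [2, 3]], [('y', 2)]): A returns [[1], [2]], B returns [[1], [2, 3]]; on fold_dots([[]], [('x', -1)]): A returns [[]], B returns [[]]; on fold_dots([[0, 0, 0, 8]], [('x', 1)]): A returns [[8]], B returns [[0]]
import Mathlib
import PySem

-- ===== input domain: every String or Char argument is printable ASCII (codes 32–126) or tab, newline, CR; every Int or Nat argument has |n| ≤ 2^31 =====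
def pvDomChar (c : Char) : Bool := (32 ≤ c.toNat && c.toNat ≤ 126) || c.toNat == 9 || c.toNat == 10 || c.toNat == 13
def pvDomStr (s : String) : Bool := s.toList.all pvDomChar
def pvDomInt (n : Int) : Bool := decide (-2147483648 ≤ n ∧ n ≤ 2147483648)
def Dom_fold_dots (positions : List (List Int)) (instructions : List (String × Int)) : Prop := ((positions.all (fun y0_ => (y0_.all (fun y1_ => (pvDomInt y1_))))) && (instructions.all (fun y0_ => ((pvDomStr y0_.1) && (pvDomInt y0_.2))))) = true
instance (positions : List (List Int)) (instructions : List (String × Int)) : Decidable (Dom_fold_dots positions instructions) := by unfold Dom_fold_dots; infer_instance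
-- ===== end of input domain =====

-- B folds each line directly (keep half, OR the mirrored far half onto it) instead of
-- A's preallocated grid with a nested index loop; equivalence is proved on Pre_ below.

-- ===== PORT A =====
-- one 'x' instruction: new grid of h rows × axis_num zeros, then the product loop
def pvStepXA (positions : List (List Int)) (a : Int) : List (List Int) :=
  let w := (PySem.List.pyGetD positions 0 []).length
  let new0 : List (List Int) :=
    (List.range positions.length).map (fun _ => (PySem.List.pyRange 0 a 1).map (fun _ => (0 : Int)))
  (List.range positions.length).foldl (fun (g : List (List Int)) (y : Nat) =>
    (List.range w).foldl (fun (g : List (List Int)) (x : Nat) =>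
      if (x : Int) < a then
        PySem.List.pySetD g (y : Int)
          (PySem.List.pySetD (PySem.List.pyGetD g (y : Int) []) (x : Int)
            (PySem.List.pyGetD (PySem.List.pyGetD positions (y : Int) []) (x : Int) 0))
      else if a < (x : Int) then
        PySem.List.pySetD g (y : Int)
          (PySem.List.pySetD (PySem.List.pyGetD g (y : Int) []) (2 * a - x)
            (PySem.Int.bor
              (PySem.List.pyGetD (PySem.List.pyGetD g (y : Int) []) (2 * a - x) 0)
              (PySem.List.pyGetD (PySem.List.pyGetD positions (y : Int) []) (x : Int) 0)))
      else g) g) new0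

-- one 'y' instruction: new grid of axis_num rows × w zeros, then the product loop
def pvStepYA (positions : List (List Int)) (a : Int) : List (List Int) :=
  let w := (PySem.List.pyGetD positions 0 []).length
  let new0 : List (List Int) :=
    (PySem.List.pyRange 0 a 1).map (fun _ => (List.range w).map (fun _ => (0 : Int)))
  (List.range positions.length).foldl (fun (g : List (List Int)) (y : Nat) =>
    (List.range w).foldl (fun (g : List (List Int)) (x : Nat) =>
      if (y : Int) < a then
        PySem.List.pySetD g (y : Int)
          (PySem.List.pySetD (PySem.List.pyGetD g (y : Int) []) (x : Int)
            (PySem.List.pyGetD (PySem.List.pyGetD positions (y : Int) []) (x : Int) 0))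
      else if a < (y : Int) then
        PySem.List.pySetD g (2 * a - y)
          (PySem.List.pySetD (PySem.List.pyGetD g (2 * a - y) []) (x : Int)
            (PySem.Int.bor
              (PySem.List.pyGetD (PySem.List.pyGetD g (2 * a - y) []) (x : Int) 0)
              (PySem.List.pyGetD (PySem.List.pyGetD positions (y : Int) []) (x : Int) 0)))
      else g) g) new0

def fold_dots (positions : List (List Int)) (instructions : List (String × Int)) : List (List Int) :=
  match instructions with
  | [] => positions
  | (axis, axis_num) :: rest =>
    if axis == "x" then fold_dots (pvStepXA positions axis_num) rest
    else if axis == "y" then fold_dots (pvStepYA positions axis_num) rest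
    else positions  -- Python: bare `raise`; excluded by Pre_fold_dots

-- ===== PORT B =====
-- _fold_line: build the kept half front to back, OR-ing the mirrored far half on
def pvFoldLineB {α : Type} (seq : List α) (a : Int) (zero : α) (comb : α → α → α) : List α :=
  (PySem.List.pyRange 0 a 1).foldl (fun out i =>
    let v := if i < (seq.length : Int) then PySem.List.pyGetD seq i zero else zero
    let j := 2 * a - i
    let v := if j < (seq.length : Int) then comb v (PySem.List.pyGetD seq j zero) else v
    out ++ [v]) []

def fold_dots_alt (positions : List (List Int)) (instructions : List (String × Int)) : List (List Int) :=
  match instructions with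
  | [] => positions
  | (axis, axis_num) :: rest =>
    if axis == "y" then
      fold_dots_alt
        (pvFoldLineB positions axis_num
          (List.replicate (PySem.List.pyGetD positions 0 []).length (0 : Int))
          (fun u v => (u.zip v).map (fun p => PySem.Int.bor p.1 p.2))) rest
    else if axis == "x" then
      fold_dots_alt (positions.map (fun row => pvFoldLineB row axis_num 0 PySem.Int.bor)) rest
    else positions  -- Python: raise ValueError; excluded by Pre_fold_dots

-- ===== PRECONDITION & SPEC =====
def pvRect (positions : List (List Int)) : Bool :=
  positions.all (fun r => r.length == (positions.headD []).length)

-- dimension tracking: per instruction the axis is 'x'/'y', the grid is nonempty,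
-- the fold coordinate is nonnegative and the fold is at or beyond the midline
-- (dim ≤ 2a+1), so the folded half lands entirely on the kept half
def pvPreDims : List (String × Int) → Nat → Nat → Bool
  | [], _, _ => true
  | (axis, a) :: rest, h, w =>
    decide (0 ≤ a) && decide (0 < h) &&
      (if axis == "x" then decide ((w : Int) ≤ 2 * a + 1) && pvPreDims rest h a.toNat
       else if axis == "y" then decide ((h : Int) ≤ 2 * a + 1) && pvPreDims rest a.toNat w
       else false)

-- Pre_ excludes the inputs where A raises (unknown axis, empty grid, rows too short,
-- fold index unreachable) and three natural-domain corners no fold instruction would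
-- specify, on which A can still return: ragged grids (a dot grid is rectangular),
-- negative fold coordinates, and folds strictly before the midline (far half longer
-- than the kept half), where A wraps the overhanging dots around via Python negative
-- indexing while B lets them fall off the sheet — both are defensible readings of an
-- unspecified instruction.
def Pre_fold_dots (positions : List (List Int)) (instructions : List (String × Int)) : Prop :=
  (instructions ≠ [] → pvRect positions = true) ∧
    pvPreDims instructions positions.length (positions.headD []).length = true
instance (positions : List (List Int)) (instructions : List (String × Int)) : Decidable (Pre_fold_dots positions instructions) := by unfold Pre_fold_dots; infer_instance

def pvWitness_fold_dots : List (List Int) × (List (String × Int)) :=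
  ([[1, 0], [0, 1], [1, 1]], [("y", 1)])

def Spec_fold_dots (positions : List (List Int)) (instructions : List (String × Int)) (out : List (List Int)) : Prop :=
  out = fold_dots_alt positions instructions
instance (positions : List (List Int)) (instructions : List (String × Int)) (out : List (List Int)) : Decidable (Spec_fold_dots positions instructions out) := by unfold Spec_fold_dots; infer_instance

-- ===== CLAIM (what is proved, stated in full; the proofs are below) =====
def Claim_equal_fold_dots : Prop := ∀ (positions : List (List Int)) (instructions : List (String × Int)), Dom_fold_dots positions instructions → Pre_fold_dots positions instructions → Spec_fold_dots positions instructions (fold_dots positions instructions)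

-- ===== LEMMAS AND PROOFS =====

-- the value of line cell i after the first u source indices have been processed
def pvVal {α : Type} (src : Nat → α) (zero : α) (comb : α → α → α) (A u i : Nat) : α :=
  if 2 * A - i < u ∧ i < A then comb (if i < u then src i else zero) (src (2 * A - i))
  else (if i < u then src i else zero)

-- final cell value, as B computes it
def pvOut {α : Type} (src : Nat → α) (zero : α) (comb : α → α → α) (A w i : Nat) : α :=
  if 2 * A - i < w then comb (if i < w then src i else zero) (src (2 * A - i))
  else (if i < w then src i else zero)

-- the abstract shape of A's per-source loop (cells for axis 'x', whole rows for 'y')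
def pvGenStep {α : Type} (A : Nat) (src : Nat → α) (zero : α) (comb : α → α → α)
    (r : List α) (x : Nat) : List α :=
  if x < A then r.set x (src x)
  else if A < x then r.set (2 * A - x) (comb (r.getD (2 * A - x) zero) (src x))
  else r

theorem pv_foldl_eq_of_inv {σ β : Type} (I : σ → Prop) (f g : σ → β → σ) :
    ∀ (xs : List β) (s : σ), I s → (∀ s b, I s → b ∈ xs → f s b = g s b) →
      (∀ s b, I s → b ∈ xs → I (g s b)) → xs.foldl f s = xs.foldl g s := by
  intro xs
  induction xs with
  | nil => intro s _ _ _; rfl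
  | cons b xs ih =>
    intro s hs hfg hpres
    simp only [List.foldl_cons]
    rw [hfg s b hs (by simp)]
    exact ih (g s b) (hpres s b hs (by simp))
      (fun s' b' hs' hb' => hfg s' b' hs' (by simp [hb']))
      (fun s' b' hs' hb' => hpres s' b' hs' (by simp [hb']))

theorem pv_foldl_id {σ β : Type} (xs : List β) (g : σ) : xs.foldl (fun g _ => g) g = g := by
  induction xs generalizing g with
  | nil => rfl
  | cons x xs ih => exact ih g

theorem pv_foldl_rowify {α β : Type} (d : α) (y : Nat) (G : α → β → α) :
    ∀ (xs : List β) (B : List α → β → List α) (g : List α), y < g.length →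
      (∀ g' x, y < g'.length → x ∈ xs → B g' x = g'.set y (G (g'.getD y d) x)) →
      xs.foldl B g = g.set y (xs.foldl G (g.getD y d)) := by
  intro xs
  induction xs with
  | nil =>
    intro B g hy _
    simp only [List.foldl_nil]
    rw [List.getD_eq_getElem _ d hy, List.set_getElem_self]
  | cons x xs ih =>
    intro B g hy hB
    simp only [List.foldl_cons]
    rw [hB g x hy (by simp)]
    rw [ih B (g.set y (G (g.getD y d) x)) (by simpa using hy)
      (fun g' x' hg' hx' => hB g' x' hg' (by simp [hx']))]
    have h1 : (g.set y (G (g.getD y d) x)).getD y d = G (g.getD y d) x := by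
      rw [List.getD_eq_getElem _ d (by simpa using hy), List.getElem_set_self]
    rw [h1, List.set_set]

theorem pv_foldl_snoc_map {α β : Type} (f : α → β) (l : List α) (acc : List β) :
    l.foldl (fun out i => out ++ [f i]) acc = acc ++ l.map f := by
  induction l generalizing acc with
  | nil => simp
  | cons x l ih => simp [ih]

-- characterisation of the "set each index once, reading only itself" loop
theorem pv_foldl_setf {α : Type} (d : α) (f : Nat → α → α) :
    ∀ (u : Nat) (r : List α),
      ((List.range u).foldl (fun r x => r.set x (f x (r.getD x d))) r).length = r.length ∧
      ∀ i, i < r.length →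
        ((List.range u).foldl (fun r x => r.set x (f x (r.getD x d))) r).getD i d =
          if i < u then f i (r.getD i d) else r.getD i d := by
  intro u
  induction u with
  | zero => intro r; simp
  | succ u ih =>
    intro r
    obtain ⟨hlen, hpt⟩ := ih r
    rw [List.range_succ, List.foldl_append]
    simp only [List.foldl_cons, List.foldl_nil]
    constructor
    · rw [List.length_set]; exact hlen
    · intro i hi
      have hFi : i < ((List.range u).foldl (fun r x => r.set x (f x (r.getD x d))) r).length := by
        omega
      by_cases hiu : i = u
      · subst hiu
        rw [List.getD_eq_getElem _ d (by rw [List.length_set]; exact hFi), List.getElem_set_self, hpt i hi]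
        simp
      · rw [List.getD_eq_getElem _ d (by rw [List.length_set]; exact hFi), List.getElem_set,
            if_neg (Ne.symm hiu), ← List.getD_eq_getElem _ d hFi, hpt i hi]
        by_cases hlt : i < u
        · rw [if_pos hlt, if_pos (by omega)]
        · rw [if_neg hlt, if_neg (by omega)]

theorem pv_gen_inv {α : Type} (src : Nat → α) (zero : α) (comb : α → α → α) (A w : Nat)
    (hw : w ≤ 2 * A + 1) : ∀ u, u ≤ w →
    (List.range u).foldl (pvGenStep A src zero comb) (List.replicate A zero) =
      (List.range A).map (pvVal src zero comb A u) := by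
  intro u
  induction u with
  | zero =>
    intro _
    simp only [List.range_zero, List.foldl_nil]
    apply List.ext_getElem
    · simp
    · intro i h1 h2
      simp only [List.getElem_replicate, List.getElem_map, List.getElem_range]
      simp only [pvVal]
      rw [if_neg (by omega), if_neg (by omega)]
  | succ u ih =>
    intro hu
    rw [List.range_succ, List.foldl_append, ih (by omega)]
    simp only [List.foldl_cons, List.foldl_nil]
    unfold pvGenStep
    rcases Nat.lt_trichotomy u A with hA | hA | hA
    · rw [if_pos hA]
      apply List.ext_getElem
      · simp
      · intro i h1 h2
        have hi : i < A := by simpa using h2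
        rw [List.getElem_set]
        simp only [List.getElem_map, List.getElem_range, pvVal]
        split_ifs <;> first | rfl | omega | congr 1
    · rw [if_neg (by omega), if_neg (by omega)]
      apply List.ext_getElem
      · simp
      · intro i h1 h2
        have hi : i < A := by simpa using h2
        simp only [List.getElem_map, List.getElem_range, pvVal]
        split_ifs <;> first | rfl | omega
    · rw [if_neg (by omega), if_pos hA]
      have hu2A : u ≤ 2 * A := by omega
      apply List.ext_getElem
      · simp
      · intro i h1 h2
        have hi : i < A := by simpa using h2
        have ht : 2 * A - u < A := by omega
        have hgd : (List.map (pvVal src zero comb A u) (List.range A)).getD (2 * A - u) zero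
            = pvVal src zero comb A u (2 * A - u) := by
          rw [List.getD_eq_getElem _ zero (by simpa using ht)]
          simp
        simp only [hgd, List.getElem_set, List.getElem_map, List.getElem_range, pvVal]
        split_ifs <;> first | rfl | omega | (congr 1 <;> first | rfl | omega | (congr 1 <;> omega))

theorem pvVal_final {α : Type} (src : Nat → α) (zero : α) (comb : α → α → α) (A w i : Nat)
    (hi : i < A) : pvVal src zero comb A w i = pvOut src zero comb A w i := by
  simp only [pvVal, pvOut]
  by_cases hc : 2 * A - i < w
  · rw [if_pos ⟨hc, hi⟩, if_pos hc]
  · rw [if_neg (by omega), if_neg hc]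

theorem pvOut_congr {α : Type} (s s' : Nat → α) (zero : α) (comb : α → α → α) (A w i : Nat)
    (h : ∀ k, k < w → s k = s' k) :
    pvOut s zero comb A w i = pvOut s' zero comb A w i := by
  simp only [pvOut]
  by_cases hc : 2 * A - i < w
  · rw [if_pos hc, if_pos hc, h (2 * A - i) hc]
    by_cases hiw : i < w
    · rw [if_pos hiw, if_pos hiw, h i hiw]
    · rw [if_neg hiw, if_neg hiw]
  · rw [if_neg hc, if_neg hc]
    by_cases hiw : i < w
    · rw [if_pos hiw, if_pos hiw, h i hiw]
    · rw [if_neg hiw, if_neg hiw]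

theorem pvFoldLineB_eq {α : Type} (seq : List α) (a : Int) (zero : α) (comb : α → α → α)
    (ha : 0 ≤ a) :
    pvFoldLineB seq a zero comb =
      (List.range a.toNat).map (pvOut (fun k => seq.getD k zero) zero comb a.toNat seq.length) := by
  have haA : a = ((a.toNat : Nat) : Int) := by omega
  unfold pvFoldLineB
  rw [haA, PySem.List.pyRange_zero_natCast, pv_foldl_snoc_map]
  simp only [List.nil_append, List.map_map]
  apply List.map_congr_left
  intro i hi
  have hiA : i < a.toNat := List.mem_range.mp hi
  simp only [Function.comp]
  have hj : 2 * ((a.toNat : Nat) : Int) - (i : Int) = ((2 * a.toNat - i : Nat) : Int) := by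
    omega
  rw [hj]
  simp only [PySem.List.pyGetD_natCast, Nat.cast_lt, pvOut]
  split_ifs <;> first | rfl | omega

theorem pv_copy_eval (w : Nat) (r s : List Int) (hr : r.length = w) (hs : s.length = w) :
    (List.range w).foldl (fun r x => r.set x (s.getD x (0 : Int))) r = s := by
  show (List.range w).foldl
      (fun r x => r.set x ((fun x _ => s.getD x (0 : Int)) x (r.getD x 0))) r = s
  obtain ⟨hlen, hpt⟩ := pv_foldl_setf (0 : Int) (fun x _ => s.getD x (0 : Int)) w r
  apply List.ext_getElem
  · rw [hlen, hr, hs]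
  · intro i h1 h2
    have h3 : i < r.length := by rw [hlen] at h1; exact h1
    rw [← List.getD_eq_getElem _ (0 : Int) h1, hpt i h3, if_pos (show i < w by omega),
      List.getD_eq_getElem _ _ h2]

theorem pv_zip_eval (w : Nat) (r s : List Int) (hr : r.length = w) (hs : s.length = w) :
    (List.range w).foldl (fun r x => r.set x (PySem.Int.bor (r.getD x 0) (s.getD x 0))) r =
      (r.zip s).map (fun p => PySem.Int.bor p.1 p.2) := by
  show (List.range w).foldl
      (fun r x => r.set x ((fun x v => PySem.Int.bor v (s.getD x (0 : Int))) x (r.getD x 0))) r = _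
  obtain ⟨hlen, hpt⟩ := pv_foldl_setf (0 : Int) (fun x v => PySem.Int.bor v (s.getD x (0 : Int))) w r
  apply List.ext_getElem
  · rw [hlen]; simp [hr, hs]
  · intro i h1 h2
    have h3 : i < r.length := by rw [hlen] at h1; exact h1
    have h4 : i < s.length := by omega
    rw [← List.getD_eq_getElem _ (0 : Int) h1, hpt i h3, if_pos (show i < w by omega)]
    simp only [List.getElem_map, List.getElem_zip]
    rw [List.getD_eq_getElem _ _ h3, List.getD_eq_getElem _ _ h4]

theorem pvStepXA_eq (positions : List (List Int)) (a : Int) (ha : 0 ≤ a)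
    (hrect : pvRect positions = true) (h0 : 0 < positions.length)
    (hw : (positions.headD []).length ≤ 2 * a.toNat + 1) :
    pvStepXA positions a = positions.map (fun row => pvFoldLineB row a 0 PySem.Int.bor) := by
  have hW : PySem.List.pyGetD positions 0 [] = positions.headD [] := by
    rw [show (0 : Int) = ((0 : Nat) : Int) from rfl, PySem.List.pyGetD_natCast]
    cases positions <;> rfl
  simp only [pvStepXA, hW]
  have hcast : PySem.List.pyRange 0 a = List.map (fun k : Nat => (k : Int)) (List.range a.toNat) := by
    conv_lhs => rw [show a = ((a.toNat : Nat) : Int) from by omega]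
    exact PySem.List.pyRange_zero_natCast a.toNat
  have hzrow : List.map (fun _ => (0 : Int)) (PySem.List.pyRange 0 a)
      = List.replicate a.toNat (0 : Int) := by
    rw [hcast]
    apply List.ext_getElem
    · simp
    · intro i h1 h2
      simp
  have hnew0 : (List.map (fun _ => List.map (fun _ => (0 : Int)) (PySem.List.pyRange 0 a))
      (List.range positions.length))
      = List.replicate positions.length (List.replicate a.toNat (0 : Int)) := by
    simp only [hzrow]
    apply List.ext_getElem
    · simp
    · intro i h1 h2
      simp
  rw [hnew0]
  have houter :
      (List.range positions.length).foldl
        (fun (g : List (List Int)) (y : Nat) =>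
          (List.range (positions.headD []).length).foldl
            (fun (g : List (List Int)) (x : Nat) =>
              if (x : Int) < a then
                PySem.List.pySetD g (y : Int)
                  (PySem.List.pySetD (PySem.List.pyGetD g (y : Int) []) (x : Int)
                    (PySem.List.pyGetD (PySem.List.pyGetD positions (y : Int) []) (x : Int) 0))
              else if a < (x : Int) then
                PySem.List.pySetD g (y : Int)
                  (PySem.List.pySetD (PySem.List.pyGetD g (y : Int) []) (2 * a - x)
                    (PySem.Int.bor
                      (PySem.List.pyGetD (PySem.List.pyGetD g (y : Int) []) (2 * a - x) 0)
                      (PySem.List.pyGetD (PySem.List.pyGetD positions (y : Int) []) (x : Int) 0)))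
              else g) g)
        (List.replicate positions.length (List.replicate a.toNat (0 : Int)))
      = (List.range positions.length).foldl
        (fun (g : List (List Int)) (y : Nat) =>
          g.set y ((fun (y : Nat) (r : List Int) =>
            (List.range (positions.headD []).length).foldl
              (pvGenStep a.toNat (fun k => (positions.getD y []).getD k 0) 0 PySem.Int.bor) r)
            y (g.getD y [])))
        (List.replicate positions.length (List.replicate a.toNat (0 : Int))) := by
    refine pv_foldl_eq_of_inv (fun g : List (List Int) => g.length = positions.length) _ _ _ _
      (by simp) ?_ ?_
    · intro g y hg hy
      replace hg : g.length = positions.length := hg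
      have hyh : y < positions.length := List.mem_range.mp hy
      refine pv_foldl_rowify ([] : List Int) y _ _ _ g (by omega) ?_
      intro g' x hg' hx
      have hxW : x < (positions.headD []).length := List.mem_range.mp hx
      have hix : 2 * a - (x : Int) = ((2 * a.toNat - x : Nat) : Int) := by omega
      simp only [hix, PySem.List.pySetD_natCast, PySem.List.pyGetD_natCast, pvGenStep]
      split_ifs <;> first | rfl | omega | rw [List.getD_eq_getElem _ _ hg', List.set_getElem_self]
    · intro g y hg _
      replace hg : g.length = positions.length := hg
      simp only [List.length_set]
      exact hg
  rw [houter]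
  obtain ⟨hlen, hpt⟩ := pv_foldl_setf ([] : List Int)
    (fun (y : Nat) (r : List Int) =>
      (List.range (positions.headD []).length).foldl
        (pvGenStep a.toNat (fun k => (positions.getD y []).getD k 0) 0 PySem.Int.bor) r)
    positions.length (List.replicate positions.length (List.replicate a.toNat (0 : Int)))
  apply List.ext_getElem
  · rw [hlen]; simp
  · intro y h1 h2
    have hyh : y < positions.length := by simpa using h2
    have hrowlen : (positions.getD y []).length = (positions.headD []).length := by
      have := (List.all_eq_true.mp hrect) (positions[y]) (List.getElem_mem hyh)
      rw [List.getD_eq_getElem _ _ hyh]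
      simpa using this
    rw [← List.getD_eq_getElem _ ([] : List Int) h1, hpt y (by simpa using hyh),
      if_pos hyh]
    have hrepl : (List.replicate positions.length (List.replicate a.toNat (0 : Int))).getD y []
        = List.replicate a.toNat (0 : Int) := by
      rw [List.getD_eq_getElem _ _ (by simpa using hyh), List.getElem_replicate]
    rw [hrepl, pv_gen_inv _ _ _ _ _ hw _ le_rfl]
    simp only [List.getElem_map]
    rw [pvFoldLineB_eq _ _ _ _ ha]
    have hrow : positions.getD y [] = positions[y] := List.getD_eq_getElem _ _ hyh
    rw [← hrow, hrowlen]
    apply List.map_congr_left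
    intro i hi
    exact pvVal_final _ _ _ _ _ _ (List.mem_range.mp hi)

theorem pvStepYA_eq (positions : List (List Int)) (a : Int) (ha : 0 ≤ a)
    (hrect : pvRect positions = true) (h0 : 0 < positions.length)
    (hh : positions.length ≤ 2 * a.toNat + 1) :
    pvStepYA positions a =
      pvFoldLineB positions a (List.replicate (PySem.List.pyGetD positions 0 []).length (0 : Int))
        (fun u v => (u.zip v).map (fun p => PySem.Int.bor p.1 p.2)) := by
  have hW : PySem.List.pyGetD positions 0 [] = positions.headD [] := by
    rw [show (0 : Int) = ((0 : Nat) : Int) from rfl, PySem.List.pyGetD_natCast]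
    cases positions <;> rfl
  simp only [pvStepYA, hW]
  have hcast : PySem.List.pyRange 0 a = List.map (fun k : Nat => (k : Int)) (List.range a.toNat) := by
    conv_lhs => rw [show a = ((a.toNat : Nat) : Int) from by omega]
    exact PySem.List.pyRange_zero_natCast a.toNat
  have hnew0 : (List.map (fun _ => List.map (fun _ => (0 : Int)) (List.range (positions.headD []).length))
      (PySem.List.pyRange 0 a))
      = List.replicate a.toNat (List.replicate (positions.headD []).length (0 : Int)) := by
    rw [hcast]
    apply List.ext_getElem
    · simp
    · intro i h1 h2
      simp
  rw [hnew0]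
  have hrect' : ∀ y, y < positions.length → (positions.getD y []).length = (positions.headD []).length := by
    intro y hy
    have := (List.all_eq_true.mp hrect) (positions[y]) (List.getElem_mem hy)
    rw [List.getD_eq_getElem _ _ hy]
    simpa using this
  have houter :
      (List.range positions.length).foldl
        (fun (g : List (List Int)) (y : Nat) =>
          (List.range (positions.headD []).length).foldl
            (fun (g : List (List Int)) (x : Nat) =>
              if (y : Int) < a then
                PySem.List.pySetD g (y : Int)
                  (PySem.List.pySetD (PySem.List.pyGetD g (y : Int) []) (x : Int)
                    (PySem.List.pyGetD (PySem.List.pyGetD positions (y : Int) []) (x : Int) 0))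
              else if a < (y : Int) then
                PySem.List.pySetD g (2 * a - y)
                  (PySem.List.pySetD (PySem.List.pyGetD g (2 * a - y) []) (x : Int)
                    (PySem.Int.bor
                      (PySem.List.pyGetD (PySem.List.pyGetD g (2 * a - y) []) (x : Int) 0)
                      (PySem.List.pyGetD (PySem.List.pyGetD positions (y : Int) []) (x : Int) 0)))
              else g) g)
        (List.replicate a.toNat (List.replicate (positions.headD []).length (0 : Int)))
      = (List.range positions.length).foldl
        (pvGenStep a.toNat (fun y => positions.getD y [])
          (List.replicate (positions.headD []).length (0 : Int))
          (fun u v => (u.zip v).map (fun p => PySem.Int.bor p.1 p.2)))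
        (List.replicate a.toNat (List.replicate (positions.headD []).length (0 : Int))) := by
    refine pv_foldl_eq_of_inv
      (fun g : List (List Int) => g.length = a.toNat ∧
        ∀ r ∈ g, r.length = (positions.headD []).length) _ _ _ _
      (by constructor
          · simp
          · intro r hr
            rw [List.eq_of_mem_replicate hr]
            simp) ?_ ?_
    · intro g y hg hy
      obtain ⟨hglen, hgrows⟩ := hg
      have hyh : y < positions.length := List.mem_range.mp hy
      rcases lt_trichotomy ((y : Int)) a with hlt | heq | hgt
      · -- y < a : row y is overwritten by row y of positions
        have hyA : y < a.toNat := by omega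
        simp only [if_pos hlt, PySem.List.pySetD_natCast, PySem.List.pyGetD_natCast]
        rw [pv_foldl_rowify ([] : List Int) y
          (fun r x => r.set x ((positions.getD y []).getD x 0)) _ _ g (by omega) ?_]
        · have hrowg : (g.getD y []).length = (positions.headD []).length := by
            rw [List.getD_eq_getElem _ _ (by omega)]
            exact hgrows _ (List.getElem_mem (by omega))
          rw [pv_copy_eval _ _ _ hrowg (hrect' y hyh)]
          unfold pvGenStep
          rw [if_pos hyA]
        · intro g' x hg' hx
          rfl
      · -- y = a : the crease line, nothing happens
        simp only [if_neg (by omega : ¬ ((y : Int) < a)), if_neg (by omega : ¬ (a < (y : Int)))]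
        rw [pv_foldl_id]
        unfold pvGenStep
        rw [if_neg (by omega : ¬ (y < a.toNat)), if_neg (by omega : ¬ (a.toNat < y))]
      · -- a < y : row y is OR-ed onto row 2a - y
        have hyA : a.toNat < y := by omega
        have hy2A : y ≤ 2 * a.toNat := by omega
        have hτ : (2 : Int) * a - (y : Int) = ((2 * a.toNat - y : Nat) : Int) := by omega
        have hτA : 2 * a.toNat - y < a.toNat := by omega
        simp only [if_neg (by omega : ¬ ((y : Int) < a)), if_pos hgt, hτ,
          PySem.List.pySetD_natCast, PySem.List.pyGetD_natCast]
        rw [pv_foldl_rowify ([] : List Int) (2 * a.toNat - y)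
          (fun r x => r.set x (PySem.Int.bor (r.getD x 0) ((positions.getD y []).getD x 0)))
          _ _ g (by omega) ?_]
        · have hrowg : (g.getD (2 * a.toNat - y) []).length = (positions.headD []).length := by
            rw [List.getD_eq_getElem _ _ (by omega)]
            exact hgrows _ (List.getElem_mem (by omega))
          rw [pv_zip_eval _ _ _ hrowg (hrect' y hyh)]
          unfold pvGenStep
          rw [if_neg (by omega : ¬ (y < a.toNat)), if_pos hyA]
          have hgd : g.getD (2 * a.toNat - y) (List.replicate (positions.headD []).length (0 : Int))
              = g.getD (2 * a.toNat - y) [] := by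
            rw [List.getD_eq_getElem _ _ (by omega), List.getD_eq_getElem _ _ (by omega)]
          rw [hgd]
        · intro g' x hg' hx
          rfl
    · intro g y hg hy
      obtain ⟨hglen, hgrows⟩ := hg
      have hyh : y < positions.length := List.mem_range.mp hy
      unfold pvGenStep
      constructor
      · split_ifs <;> simp [hglen]
      · intro r hr
        split_ifs at hr with hc1 hc2
        · rcases List.mem_or_eq_of_mem_set hr with h | h
          · exact hgrows r h
          · rw [h]; exact hrect' y hyh
        · rcases List.mem_or_eq_of_mem_set hr with h | h
          · exact hgrows r h
          · rw [h]
            simp only [List.length_map, List.length_zip]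
            have hs : (positions.getD y []).length = (positions.headD []).length := hrect' y hyh
            have hr2 : (g.getD (2 * a.toNat - y) (List.replicate (positions.headD []).length (0 : Int))).length
                = (positions.headD []).length := by
              by_cases hlt : 2 * a.toNat - y < g.length
              · rw [List.getD_eq_getElem _ _ hlt]
                exact hgrows _ (List.getElem_mem hlt)
              · rw [List.getD_eq_default _ _ (by omega)]
                simp
            rw [hr2, hs]
            omega
        · exact hgrows r hr
  rw [houter, pv_gen_inv _ _ _ _ _ hh _ le_rfl, pvFoldLineB_eq _ _ _ _ ha]
  apply List.map_congr_left
  intro i hi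
  rw [pvVal_final _ _ _ _ _ _ (List.mem_range.mp hi)]
  apply pvOut_congr
  intro k hk
  rw [List.getD_eq_getElem _ _ hk, List.getD_eq_getElem _ _ hk]

theorem pv_main : ∀ (instructions : List (String × Int)) (positions : List (List Int)),
    pvRect positions = true →
    pvPreDims instructions positions.length (positions.headD []).length = true →
    fold_dots positions instructions = fold_dots_alt positions instructions := by
  intro instructions
  induction instructions with
  | nil => intro pos _ _; rfl
  | cons p rest ih =>
    obtain ⟨axis, a⟩ := p
    intro pos hrect hpre
    simp only [pvPreDims, Bool.and_eq_true, decide_eq_true_eq] at hpre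
    obtain ⟨⟨ha, hh0⟩, hif⟩ := hpre
    have hheadD : ∀ (l : List (List Int)), 0 < l.length → l.headD [] = l.getD 0 [] := by
      intro l hl
      cases l
      · simp at hl
      · rfl
    by_cases haxx : axis = "x"
    · -- fold along x
      subst haxx
      simp only [beq_self_eq_true, if_pos, Bool.and_eq_true, decide_eq_true_eq] at hif
      obtain ⟨hw3, hpre2⟩ := hif
      have hw2 : (pos.headD []).length ≤ 2 * a.toNat + 1 := by omega
      simp only [fold_dots, fold_dots_alt]
      rw [if_pos (by decide : (("x" : String) == "x") = true),
        if_neg (by decide : ¬ ((("x" : String) == "y") = true)),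
        if_pos (by decide : (("x" : String) == "x") = true)]
      rw [pvStepXA_eq pos a ha hrect hh0 hw2]
      have hlenF : ∀ row : List Int, (pvFoldLineB row a (0 : Int) PySem.Int.bor).length = a.toNat := by
        intro row
        rw [pvFoldLineB_eq _ _ _ _ ha]
        simp
      have hnlen : (pos.map (fun row => pvFoldLineB row a 0 PySem.Int.bor)).length = pos.length := by
        simp
      have hnhead : ((pos.map (fun row => pvFoldLineB row a 0 PySem.Int.bor)).headD []).length
          = a.toNat := by
        rw [hheadD _ (by simpa using hh0), List.getD_eq_getElem _ _ (by simpa using hh0),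
          List.getElem_map]
        exact hlenF _
      apply ih
      · rw [pvRect]
        apply List.all_eq_true.mpr
        intro r hr
        obtain ⟨row, _, hrow⟩ := List.mem_map.mp hr
        rw [← hrow, hnhead]
        simp [hlenF]
      · rw [hnlen, hnhead]
        exact hpre2
    · by_cases haxy : axis = "y"
      · -- fold along y
        subst haxy
        simp only [beq_self_eq_true, if_pos, show (("y" : String) == "x") = false by decide,
          Bool.false_eq_true, if_false, Bool.and_eq_true, decide_eq_true_eq] at hif
        obtain ⟨hh3, hpre2⟩ := hif
        have hh2 : pos.length ≤ 2 * a.toNat + 1 := by omega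
        simp only [fold_dots, fold_dots_alt]
        rw [if_neg (by decide : ¬ ((("y" : String) == "x") = true)),
          if_pos (by decide : (("y" : String) == "y") = true),
          if_pos (by decide : (("y" : String) == "y") = true)]
        rw [pvStepYA_eq pos a ha hrect hh0 hh2]
        have hWpy : PySem.List.pyGetD pos 0 [] = pos.headD [] := by
          rw [show (0 : Int) = ((0 : Nat) : Int) from rfl, PySem.List.pyGetD_natCast]
          cases pos <;> rfl
        rw [hWpy]
        have hrect' : ∀ y, y < pos.length → (pos.getD y []).length = (pos.headD []).length := by
          intro y hy
          have := (List.all_eq_true.mp hrect) (pos[y]) (List.getElem_mem hy)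
          rw [List.getD_eq_getElem _ _ hy]
          simpa using this
        have hgetlen : ∀ k, (pos.getD k (List.replicate (pos.headD []).length (0 : Int))).length
            = (pos.headD []).length := by
          intro k
          by_cases hk : k < pos.length
          · rw [List.getD_eq_getElem _ _ hk, ← List.getD_eq_getElem _ (([] : List Int)) hk]
            exact hrect' k hk
          · rw [List.getD_eq_default _ _ (by omega)]
            simp
        have hB := pvFoldLineB_eq pos a (List.replicate (pos.headD []).length (0 : Int))
          (fun u v => (u.zip v).map (fun p => PySem.Int.bor p.1 p.2)) ha
        have hrowY : ∀ r ∈ pvFoldLineB pos a (List.replicate (pos.headD []).length (0 : Int))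
            (fun u v => (u.zip v).map (fun p => PySem.Int.bor p.1 p.2)),
            r.length = (pos.headD []).length := by
          rw [hB]
          intro r hr
          obtain ⟨i, _, hi⟩ := List.mem_map.mp hr
          rw [← hi]
          unfold pvOut
          split_ifs <;> simp only [List.length_map, List.length_zip, List.length_replicate,
            hgetlen, Nat.min_self]
        have hnlen : (pvFoldLineB pos a (List.replicate (pos.headD []).length (0 : Int))
            (fun u v => (u.zip v).map (fun p => PySem.Int.bor p.1 p.2))).length = a.toNat := by
          rw [hB]
          simp
        apply ih
        · rw [pvRect]
          apply List.all_eq_true.mpr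
          intro r hr
          have hhd : ((pvFoldLineB pos a (List.replicate (pos.headD []).length (0 : Int))
              (fun u v => (u.zip v).map (fun p => PySem.Int.bor p.1 p.2))).headD []).length
              = (pos.headD []).length := by
            have h0n : 0 < (pvFoldLineB pos a (List.replicate (pos.headD []).length (0 : Int))
                (fun u v => (u.zip v).map (fun p => PySem.Int.bor p.1 p.2))).length := by
              rw [hnlen]
              rcases Nat.eq_zero_or_pos a.toNat with h | h
              · exfalso
                have : r ∈ ([] : List (List Int)) := by
                  have hnil : pvFoldLineB pos a (List.replicate (pos.headD []).length (0 : Int))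
                      (fun u v => (u.zip v).map (fun p => PySem.Int.bor p.1 p.2)) = [] := by
                    rw [hB, h]
                    rfl
                  rw [← hnil]; exact hr
                simp at this
              · exact h
            rw [hheadD _ h0n, List.getD_eq_getElem _ _ h0n]
            exact hrowY _ (List.getElem_mem h0n)
          rw [hhd]
          simp [hrowY r hr]
        · rcases rest with _ | ⟨q, rs⟩
          · rfl
          · obtain ⟨ax2, a2⟩ := q
            have h0A : 0 < a.toNat := by
              simp only [pvPreDims, Bool.and_eq_true, decide_eq_true_eq] at hpre2
              exact hpre2.1.2
            have hhd : ((pvFoldLineB pos a (List.replicate (pos.headD []).length (0 : Int))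
                (fun u v => (u.zip v).map (fun p => PySem.Int.bor p.1 p.2))).headD []).length
                = (pos.headD []).length := by
              have h0n : 0 < (pvFoldLineB pos a (List.replicate (pos.headD []).length (0 : Int))
                  (fun u v => (u.zip v).map (fun p => PySem.Int.bor p.1 p.2))).length := by
                rw [hnlen]; exact h0A
              rw [hheadD _ h0n, List.getD_eq_getElem _ _ h0n]
              exact hrowY _ (List.getElem_mem h0n)
            rw [hnlen, hhd]
            exact hpre2
      · -- unknown axis: excluded by pvPreDims
        exfalso
        rw [if_neg (by simpa using haxx), if_neg (by simpa using haxy)] at hif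
        simp at hif

-- ===== VERDICT (by name: the statement is the Claim_ definition above) =====
theorem fold_dots_spec : Claim_equal_fold_dots := by
  intro positions instructions _hdom hpre
  obtain ⟨hrect, hpre2⟩ := hpre
  cases instructions with
  | nil => rfl
  | cons q rs => exact pv_main _ _ (hrect (by simp)) hpre2
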